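-- pv_equiv track=rewrite | github.com/digestoo/ecommerce-crawler | ecommerce_crawler/spiders/ecommerce_crawler.py | get_rid_off_www
-- ===== SOURCE A (Python) =====
-- def get_rid_off_www(url):
--     if url.startswith('http://'):
--         return get_rid_off_www(url[7:])
--     if url.startswith('https://'):
--         return get_rid_off_www(url[8:])
--
--     if url.startswith('www.'):
--         return url[4:]
--     else:
--         return url
-- ===== SOURCE B (Python) =====
-- def get_rid_off_www(url):
--     # Index-based: advance a cursor past stacked schemes, strip www. once, slice once at the end.
--     i = 0
--     while True:
--         if url.startswith('http://', i):
--             i += 7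
--         elif url.startswith('https://', i):
--             i += 8
--         else:
--             break
--     if url.startswith('www.', i):
--         i += 4
--     return url[i:]
-- ===== Notes on version B (the rewrite author's own statement) =====
-- stated objective: alternative
-- what changed: Replaces A's recursion with repeated slicing by an iterative cursor that only advances an index past stacked scheme prefixes (and one www. check) and slices the string exactly once at the end.
import Mathlib
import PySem

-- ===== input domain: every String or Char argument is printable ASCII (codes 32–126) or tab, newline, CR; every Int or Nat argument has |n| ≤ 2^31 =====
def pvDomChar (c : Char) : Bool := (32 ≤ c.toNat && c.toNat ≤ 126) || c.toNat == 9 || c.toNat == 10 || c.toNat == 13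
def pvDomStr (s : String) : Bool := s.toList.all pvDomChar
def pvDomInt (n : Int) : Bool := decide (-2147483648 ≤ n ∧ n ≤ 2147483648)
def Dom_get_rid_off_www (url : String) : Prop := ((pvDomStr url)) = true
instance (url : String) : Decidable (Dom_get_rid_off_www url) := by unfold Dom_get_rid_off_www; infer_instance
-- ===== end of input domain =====

-- B replaces A's slice-per-recursive-call scheme stripping by an index cursor advanced in a
-- loop, with a single final slice; return values proved equal on all of Dom.

-- ===== PORT A =====
-- A's recursion over the string; url[7:]/url[8:]/url[4:] on ASCII strings are List.drop on toList.
def pvA (cs : List Char) : List Char :=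
  if PySem.Chars.startswith cs "http://".toList then pvA (cs.drop 7)
  else if PySem.Chars.startswith cs "https://".toList then pvA (cs.drop 8)
  else if PySem.Chars.startswith cs "www.".toList then cs.drop 4
  else cs
termination_by cs.length
decreasing_by
  · have := (PySem.Chars.startswith_iff cs "http://".toList).mp (by assumption)
    have h7 : 7 ≤ cs.length := by simpa using this.length_le
    simp; omega
  · have := (PySem.Chars.startswith_iff cs "https://".toList).mp (by assumption)
    have h8 : 8 ≤ cs.length := by simpa using this.length_le
    simp; omega

def get_rid_off_www (url : String) : String := String.ofList (pvA url.toList)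

-- ===== PORT B =====
-- B's while-loop: advance the cursor i past scheme prefixes; url.startswith(p, i) is a
-- prefix test on cs.drop i (exact on ASCII).
def pvBLoop (cs : List Char) (i : Nat) : Nat :=
  if PySem.Chars.startswith (cs.drop i) "http://".toList then pvBLoop cs (i + 7)
  else if PySem.Chars.startswith (cs.drop i) "https://".toList then pvBLoop cs (i + 8)
  else i
termination_by cs.length - i
decreasing_by
  · have := (PySem.Chars.startswith_iff _ "http://".toList).mp (by assumption)
    have h7 : 7 ≤ cs.length - i := by simpa using this.length_le
    omega
  · have := (PySem.Chars.startswith_iff _ "https://".toList).mp (by assumption)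
    have h8 : 8 ≤ cs.length - i := by simpa using this.length_le
    omega

def get_rid_off_www_alt (url : String) : String :=
  let cs := url.toList
  let i := pvBLoop cs 0
  let j := if PySem.Chars.startswith (cs.drop i) "www.".toList then i + 4 else i
  String.ofList (cs.drop j)   -- url[j:]

-- ===== PRECONDITION & SPEC =====
def Spec_get_rid_off_www (url : String) (out : String) : Prop := out = get_rid_off_www_alt url
instance (url : String) (out : String) : Decidable (Spec_get_rid_off_www url out) := by unfold Spec_get_rid_off_www; infer_instance

-- ===== CLAIM (what is proved, stated in full; the proofs are below) =====
def Claim_equal_get_rid_off_www : Prop := ∀ (url : String), Dom_get_rid_off_www url → Spec_get_rid_off_www url (get_rid_off_www url)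

-- ===== LEMMAS AND PROOFS =====
lemma pvA_eq_loop (cs : List Char) (i : Nat) :
    pvA (cs.drop i) =
      cs.drop (if PySem.Chars.startswith (cs.drop (pvBLoop cs i)) "www.".toList
               then pvBLoop cs i + 4 else pvBLoop cs i) := by
  induction i using pvBLoop.induct cs with
  | case1 i h ih =>
      rw [pvA, if_pos h, List.drop_drop, pvBLoop, if_pos h]
      exact ih
  | case2 i h1 h2 ih =>
      rw [pvA, if_neg h1, if_pos h2, List.drop_drop, pvBLoop, if_neg h1, if_pos h2]
      exact ih
  | case3 i h1 h2 =>
      rw [pvA, if_neg h1, if_neg h2, pvBLoop, if_neg h1, if_neg h2]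
      split
      · rw [List.drop_drop]
      · rfl

-- ===== VERDICT (by name: the statement is the Claim_ definition above) =====
theorem get_rid_off_www_spec : Claim_equal_get_rid_off_www := by
  intro url _
  unfold Spec_get_rid_off_www get_rid_off_www get_rid_off_www_alt
  have h := pvA_eq_loop url.toList 0
  simp only [List.drop_zero] at h
  simp only [h]
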